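-- pv_equiv track=rewrite | github.com/Birdacious/Shrimple | Shrimple.py | aericks_denumberizer
-- ===== SOURCE A (Python) =====
-- numbers_to_letters = {
--     "1": "S",
--     "2": "T",
--     "3": "P",
--     "4": "H",
--     "5": "A",
--     "6": "F",
--     "7": "P",
--     "8": "L",
--     "9": "T",
--     "0": "O"
--     }
--
-- def aericks_denumberizer(old_outline):
--
--     old_strokes = old_outline.split("/")
--     new_strokes = []
--
--     for stroke in old_strokes:
--
--         new_strokes.append(stroke)
--
--         for match in numbers_to_letters.keys():
--
--             if match in stroke:
--
--                 if new_strokes[-1][0] != "#":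
--                     new_strokes[-1] = "#" + new_strokes[-1]
--
--                 new_strokes[-1] = new_strokes[-1].replace(match, numbers_to_letters[match])
--
--         if new_strokes == []:
--             new_strokes = old_strokes
--
--     return "/".join(new_strokes)
-- ===== SOURCE B (Python) =====
-- _TABLE = str.maketrans("1234567890", "STPHAFPLTO")
--
--
-- def _fix(stroke):
--     translated = stroke.translate(_TABLE)
--     if translated == stroke or stroke.startswith("#"):
--         return translated
--     return "#" + translated
--
--
-- def aericks_denumberizer(old_outline):
--     return "/".join(_fix(stroke) for stroke in old_outline.split("/"))
-- ===== Notes on version B (the rewrite author's own statement) =====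
-- stated objective: idiomatic
-- what changed: Replaces A's per-stroke 10-key scan-and-replace loop (a substring test plus str.replace per digit, mutating the list's last element) by a single translation table built once with str.maketrans: each stroke is translated in one character pass, digit presence is detected by the translation having changed the stroke, and the hash prefix is decided from the original stroke's first character.
import Mathlib
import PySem

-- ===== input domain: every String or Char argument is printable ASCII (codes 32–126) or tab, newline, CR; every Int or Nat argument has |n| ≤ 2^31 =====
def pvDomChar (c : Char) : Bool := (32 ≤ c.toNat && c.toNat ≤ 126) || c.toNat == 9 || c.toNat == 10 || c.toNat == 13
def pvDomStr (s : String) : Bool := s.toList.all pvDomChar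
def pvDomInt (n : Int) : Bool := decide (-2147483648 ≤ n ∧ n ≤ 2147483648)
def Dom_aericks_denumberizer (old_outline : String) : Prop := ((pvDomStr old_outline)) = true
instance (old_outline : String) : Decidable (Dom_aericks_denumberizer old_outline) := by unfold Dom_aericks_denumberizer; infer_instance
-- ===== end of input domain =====

-- B replaces A's per-stroke 10-key scan-and-replace loop by one translation table applied
-- in a single character pass per stroke (idiomatic str.maketrans/translate style).

-- ===== PORT A =====
-- numbers_to_letters, iterated in dict insertion order (keys paired with their values)
def pvPairs : List (Char × Char) :=
  [('1','S'),('2','T'),('3','P'),('4','H'),('5','A'),('6','F'),('7','P'),('8','L'),('9','T'),('0','O')]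

-- the inner 'for match in numbers_to_letters.keys()' loop; Python mutates new_strokes[-1],
-- which right after the preceding append is tracked here as the local accumulator 'cur'
-- (append-then-mutate-last = transform-then-append).  new_strokes[-1][0] is pyGet? cur 0
-- (only reached when a digit occurs in stroke, so cur is never empty there and Python never raises).
def pvAStroke (stroke : List Char) : List Char :=
  pvPairs.foldl (fun cur kv =>
    if PySem.Chars.isIn [kv.1] stroke then
      let cur := if PySem.List.pyGet? cur 0 ≠ some '#' then '#' :: cur else cur
      PySem.Chars.replace cur [kv.1] [kv.2]
    else cur) stroke

def aericks_denumberizer (old_outline : String) : String :=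
  let old_strokes := PySem.Chars.splitOn old_outline.toList ['/']
  let new_strokes := old_strokes.foldl (fun ns stroke =>
      let ns := ns ++ [pvAStroke stroke]      -- append; the inner loop rewrote ns[-1]
      if ns = [] then old_strokes else ns) [] -- the (dead) 'if new_strokes == []' check
  String.ofList (PySem.Chars.join ['/'] new_strokes)

-- ===== PORT B =====
-- _TABLE = str.maketrans("1234567890", "STPHAFPLTO")
def pvTable : PySem.Dict Char Char := PySem.Dict.ofList (List.zip "1234567890".toList "STPHAFPLTO".toList)

-- _fix: translate the stroke in one pass; prefix '#' iff it changed and did not start with '#'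
def pvFix (stroke : List Char) : List Char :=
  let translated := stroke.map (fun c => (PySem.Dict.get? pvTable c).getD c)
  if translated = stroke ∨ PySem.Chars.startswith stroke ['#'] = true then translated
  else '#' :: translated

def aericks_denumberizer_alt (old_outline : String) : String :=
  String.ofList (PySem.Chars.join ['/'] ((PySem.Chars.splitOn old_outline.toList ['/']).map pvFix))

-- ===== PRECONDITION & SPEC =====
def Spec_aericks_denumberizer (old_outline : String) (out : String) : Prop := out = aericks_denumberizer_alt old_outline
instance (old_outline : String) (out : String) : Decidable (Spec_aericks_denumberizer old_outline out) := by unfold Spec_aericks_denumberizer; infer_instance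

-- ===== CLAIM (what is proved, stated in full; the proofs are below) =====
def Claim_equal_aericks_denumberizer : Prop := ∀ (old_outline : String), Dom_aericks_denumberizer old_outline → Spec_aericks_denumberizer old_outline (aericks_denumberizer old_outline)

-- ===== LEMMAS AND PROOFS =====

-- the '#'-prefixing step of A, as a function
def pvPrefix (cur : List Char) : List Char :=
  if PySem.List.pyGet? cur 0 ≠ some '#' then '#' :: cur else cur

-- the effect of successively replacing each key of ps by its value, on one character
def pvMapKeys (ps : List (Char × Char)) (c : Char) : Char :=
  ps.foldl (fun c kv => if c = kv.1 then kv.2 else c) c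

-- B's translation-table lookup, on one character
def pvTrD (c : Char) : Char := (PySem.Dict.get? pvTable c).getD c

lemma pvPyGet0 (l : List Char) : PySem.List.pyGet? l (0 : Int) = l.head? := by
  cases l <;> simp [PySem.List.pyGet?, PySem.List.pyIdx?]

lemma pvStartswith_single (s : List Char) (c : Char) :
    PySem.Chars.startswith s [c] = true ↔ s.head? = some c := by
  cases s with
  | nil => simp [PySem.Chars.startswith]
  | cons h t =>
    simp only [PySem.Chars.startswith, List.isPrefixOf, Bool.and_eq_true, beq_iff_eq,
      List.head?_cons, Option.some.injEq]
    simp [eq_comm]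

lemma pvIsIn_single (a : Char) (s : List Char) :
    PySem.Chars.isIn [a] s = true ↔ a ∈ s := by
  rw [PySem.Chars.isIn_iff_infix, List.singleton_infix_iff]

lemma pvReplace_go_single (a b : Char) (l : List Char) :
    ∀ (fuel : Nat) (acc : List Char), l.length ≤ fuel →
      PySem.Chars.replace.go [a] [b] fuel l acc
        = acc.reverse ++ l.map (fun c => if c = a then b else c) := by
  induction l with
  | nil => intro fuel acc _; cases fuel <;> simp [PySem.Chars.replace.go]
  | cons c t ih =>
    intro fuel acc hlen
    cases fuel with
    | zero => simp at hlen
    | succ n =>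
      simp only [PySem.Chars.replace.go, List.isPrefixOf, List.map]
      by_cases hc : a = c
      · subst hc
        simp only [BEq.rfl, Bool.true_and, if_true]
        rw [show List.drop [a].length (a :: t) = t from rfl,
          ih n ([b].reverse ++ acc) (by simpa using hlen)]
        simp
      · have hbeq : (a == c) = false := by simp [hc]
        simp only [hbeq, Bool.false_and, Bool.false_eq_true, if_false]
        rw [ih n (c :: acc) (by simpa using hlen)]
        simp [Ne.symm hc]

lemma pvReplace_single (cs : List Char) (a b : Char) :
    PySem.Chars.replace cs [a] [b] = cs.map (fun c => if c = a then b else c) := by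
  simp only [PySem.Chars.replace, List.isEmpty_cons, Bool.false_eq_true, if_false]
  simpa using pvReplace_go_single a b cs cs.length [] le_rfl

lemma pvMapKeys_cons (kv : Char × Char) (ps : List (Char × Char)) (c : Char) :
    pvMapKeys (kv :: ps) c = pvMapKeys ps (if c = kv.1 then kv.2 else c) := rfl

lemma pvMapKeys_of_not_key (ps : List (Char × Char)) (c : Char)
    (h : ∀ kv ∈ ps, c ≠ kv.1) : pvMapKeys ps c = c := by
  induction ps with
  | nil => rfl
  | cons kv rest ih =>
    rw [pvMapKeys_cons, if_neg (h kv (by simp))]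
    exact ih (fun kv' hkv' => h kv' (by simp [hkv']))

lemma pvMapKeys_find (ps : List (Char × Char)) (c : Char)
    (hvk : ∀ kv ∈ ps, ∀ kv' ∈ ps, kv.2 ≠ kv'.1) :
    pvMapKeys ps c = ((ps.find? (fun kv => kv.1 == c)).map Prod.snd).getD c := by
  induction ps with
  | nil => rfl
  | cons kv rest ih =>
    rw [pvMapKeys_cons]
    by_cases hc : c = kv.1
    · rw [if_pos hc, List.find?_cons_of_pos (by simp [hc])]
      simp only [Option.map_some, Option.getD_some]
      exact pvMapKeys_of_not_key rest kv.2
        (fun kv' hkv' => hvk kv (by simp) kv' (by simp [hkv']))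
    · rw [if_neg hc, List.find?_cons_of_neg (by simp [Ne.symm hc])]
      exact ih (fun x hx y hy => hvk x (by simp [hx]) y (by simp [hy]))

lemma pvFind_filter {α : Type} (l : List α) (p q : α → Bool)
    (h : ∀ x ∈ l, q x = true → p x = true) :
    (l.filter p).find? q = l.find? q := by
  induction l with
  | nil => rfl
  | cons x t ih =>
    have ih' := ih (fun y hy => h y (by simp [hy]))
    by_cases hq : q x = true
    · rw [List.filter_cons_of_pos (h x (by simp) hq), List.find?_cons_of_pos hq,
        List.find?_cons_of_pos hq]
    · by_cases hp : p x = true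
      · rw [List.filter_cons_of_pos hp, List.find?_cons_of_neg (by simp [hq]),
          List.find?_cons_of_neg (by simp [hq]), ih']
      · rw [List.filter_cons_of_neg (by simp [hp]), List.find?_cons_of_neg (by simp [hq]), ih']

lemma pvTrD_eq (c : Char) :
    pvTrD c = ((pvPairs.find? (fun kv => kv.1 == c)).map Prod.snd).getD c := rfl

lemma pvPrefix_of_head (l : List Char) (h : l.head? = some '#') : pvPrefix l = l := by
  unfold pvPrefix
  rw [pvPyGet0, h]
  simp

lemma pvPrefix_head (cur : List Char) : (pvPrefix cur).head? = some '#' := by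
  unfold pvPrefix
  by_cases h : PySem.List.pyGet? cur 0 ≠ some '#'
  · rw [if_pos h]; rfl
  · rw [if_neg h]
    rw [pvPyGet0] at h
    simpa using h

-- invariant of A's inner loop over the key list
lemma pvInnerA (ks : List (Char × Char)) (st : List Char)
    (h1 : ∀ kv ∈ ks, kv.1 ≠ '#') :
    ∀ cur : List Char,
      ks.foldl (fun cur kv =>
        if PySem.Chars.isIn [kv.1] st then
          PySem.Chars.replace (pvPrefix cur) [kv.1] [kv.2]
        else cur) cur
      = if ks.any (fun kv => PySem.Chars.isIn [kv.1] st) then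
          (pvPrefix cur).map (pvMapKeys (ks.filter (fun kv => PySem.Chars.isIn [kv.1] st)))
        else cur := by
  induction ks with
  | nil => intro cur; simp
  | cons kv rest ih =>
    intro cur
    have h1r : ∀ kv' ∈ rest, kv'.1 ≠ '#' := fun kv' h => h1 kv' (by simp [h])
    by_cases hp : PySem.Chars.isIn [kv.1] st = true
    · simp only [List.foldl_cons, List.any_cons, hp, Bool.true_or, if_true]
      rw [pvReplace_single, ih h1r]
      have hfix : pvPrefix ((pvPrefix cur).map (fun c => if c = kv.1 then kv.2 else c))
          = (pvPrefix cur).map (fun c => if c = kv.1 then kv.2 else c) :=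
        pvPrefix_of_head _ (by
          rw [List.head?_map, pvPrefix_head]
          simp [Ne.symm (h1 kv (by simp))])
      by_cases hr : rest.any (fun kv => PySem.Chars.isIn [kv.1] st) = true
      · rw [if_pos hr, hfix, List.map_map]
        apply List.map_congr_left
        intro c _
        simp only [List.filter_cons, hp, if_true, pvMapKeys_cons, Function.comp]
      · rw [if_neg hr]
        have hfil : rest.filter (fun kv => PySem.Chars.isIn [kv.1] st) = [] :=
          List.filter_eq_nil_iff.mpr
            (fun x hx hpx => hr (List.any_eq_true.mpr ⟨x, hx, hpx⟩))
        apply List.map_congr_left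
        intro c _
        simp only [List.filter_cons, hp, if_true, hfil, pvMapKeys_cons]
        rfl
    · have hp' : PySem.Chars.isIn [kv.1] st = false := by simpa using hp
      simp only [List.foldl_cons, List.any_cons, List.filter_cons, hp', Bool.false_eq_true,
        if_false, Bool.false_or]
      exact ih h1r cur

-- key facts about the concrete table, settled by computation
lemma pvKeysNotHash : ∀ kv ∈ pvPairs, kv.1 ≠ '#' := by decide
lemma pvValsNotKeys : ∀ kv ∈ pvPairs, ∀ kv' ∈ pvPairs, kv.2 ≠ kv'.1 := by decide

-- B's per-character translation agrees with A's accumulated replacements on every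
-- character that can occur in the (possibly '#'-prefixed) stroke
lemma pvMapKeys_filter_eq_trD (st : List Char) (c : Char) (hc : c ∈ st ∨ c = '#') :
    pvMapKeys (pvPairs.filter (fun kv => PySem.Chars.isIn [kv.1] st)) c = pvTrD c := by
  rw [pvTrD_eq, pvMapKeys_find _ _
    (fun x hx y hy => pvValsNotKeys x (List.mem_of_mem_filter hx) y (List.mem_of_mem_filter hy))]
  rw [pvFind_filter]
  intro kv hkv hkvc
  have hkc : kv.1 = c := by simpa using hkvc
  rcases hc with hc | hc
  · exact (pvIsIn_single kv.1 st).mpr (hkc ▸ hc)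
  · exact absurd (hkc.trans hc) (pvKeysNotHash kv hkv)

-- a digit occurring in the stroke is exactly 'translation changed the stroke'
lemma pvAny_iff_changed (st : List Char) :
    pvPairs.any (fun kv => PySem.Chars.isIn [kv.1] st) = true ↔ ¬ st.map pvTrD = st := by
  constructor
  · intro h hmap
    rcases List.any_eq_true.mp h with ⟨kv, hkv, hin⟩
    have hmem : kv.1 ∈ st := (pvIsIn_single kv.1 st).mp hin
    have hfix : pvTrD kv.1 = kv.1 := by
      have := List.map_inj_left.mp (hmap.trans (List.map_id st).symm) kv.1 hmem
      simpa using this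
    have hsome : (pvPairs.find? (fun p => p.1 == kv.1)).isSome = true :=
      List.find?_isSome.mpr ⟨kv, hkv, by simp⟩
    rcases Option.isSome_iff_exists.mp hsome with ⟨kv', hkv'⟩
    have hmem' : kv' ∈ pvPairs := List.mem_of_find?_eq_some hkv'
    have : pvTrD kv.1 = kv'.2 := by rw [pvTrD_eq, hkv']; rfl
    exact pvValsNotKeys kv' hmem' kv hkv (by rw [← this, hfix])
  · intro h
    by_contra hany
    have hany' : ∀ kv ∈ pvPairs, PySem.Chars.isIn [kv.1] st = false := fun kv hkv => by
      by_contra hx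
      exact hany (List.any_eq_true.mpr ⟨kv, hkv, by simpa using hx⟩)
    apply h
    rw [show st = st.map id by simp]
    rw [List.map_map]
    apply List.map_inj_left.mpr
    intro c hcmem
    have hnk : ∀ kv ∈ pvPairs, ¬ (kv.1 == c) = true := by
      intro kv hkv hck
      have hck' : kv.1 = c := by simpa using hck
      exact absurd ((pvIsIn_single kv.1 st).mpr (hck' ▸ hcmem)) (by simp [hany' kv hkv])
    simp only [Function.comp, id]
    rw [pvTrD_eq, List.find?_eq_none.mpr hnk]
    rfl

-- per-stroke agreement of the two ports
lemma pvStroke_eq (st : List Char) : pvAStroke st = pvFix st := by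
  have hA : pvAStroke st
      = if pvPairs.any (fun kv => PySem.Chars.isIn [kv.1] st) then
          (pvPrefix st).map (pvMapKeys (pvPairs.filter (fun kv => PySem.Chars.isIn [kv.1] st)))
        else st := by
    -- the port's loop body is definitionally the pvPrefix/replace form
    exact pvInnerA pvPairs st pvKeysNotHash st
  unfold pvFix
  simp only [← pvTrD.eq_1]
  by_cases hch : st.map pvTrD = st
  · have hany : pvPairs.any (fun kv => PySem.Chars.isIn [kv.1] st) = false := by
      by_contra h
      exact (pvAny_iff_changed st).mp (by simpa using h) hch
    rw [hA, hany]
    simp [hch]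
  · have hany := (pvAny_iff_changed st).mpr hch
    have hmapeq : st.map (pvMapKeys (pvPairs.filter (fun kv => PySem.Chars.isIn [kv.1] st)))
        = st.map pvTrD :=
      List.map_congr_left (fun c hc => pvMapKeys_filter_eq_trD st c (Or.inl hc))
    rw [hA, if_pos hany]
    by_cases hsw : PySem.Chars.startswith st ['#'] = true
    · have hpre : pvPrefix st = st :=
        pvPrefix_of_head st ((pvStartswith_single st '#').mp hsw)
      rw [hpre, hmapeq, if_pos (Or.inr hsw)]
    · have hsw' : ¬ st.head? = some '#' := fun hh => hsw ((pvStartswith_single st '#').mpr hh)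
      have hpre : pvPrefix st = '#' :: st := by
        unfold pvPrefix
        rw [pvPyGet0, if_pos (by simpa using hsw')]
      rw [hpre, if_neg (by
        rintro (h | h)
        · exact hch h
        · exact hsw h)]
      rw [List.map_cons, hmapeq, pvMapKeys_filter_eq_trD st '#' (Or.inr rfl)]
      rfl

-- A's outer loop: the 'if new_strokes == []' fallback is dead (the list just got an append)
lemma pvOuter (fb : List (List Char)) (l : List (List Char)) :
    ∀ acc : List (List Char),
      l.foldl (fun ns stroke =>
        let ns := ns ++ [pvAStroke stroke]
        if ns = [] then fb else ns) acc = acc ++ l.map pvAStroke := by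
  induction l with
  | nil => intro acc; simp
  | cons x t ih =>
    intro acc
    simp only [List.foldl_cons, List.map_cons]
    rw [show (let ns := acc ++ [pvAStroke x]; if ns = [] then fb else ns)
        = acc ++ [pvAStroke x] by simp]
    rw [ih]
    simp

-- ===== VERDICT (by name: the statement is the Claim_ definition above) =====
theorem aericks_denumberizer_spec : Claim_equal_aericks_denumberizer := by
  intro o _
  show aericks_denumberizer o = aericks_denumberizer_alt o
  have h : (PySem.Chars.splitOn o.toList ['/']).foldl (fun ns stroke =>
        let ns := ns ++ [pvAStroke stroke]
        if ns = [] then PySem.Chars.splitOn o.toList ['/'] else ns) []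
      = (PySem.Chars.splitOn o.toList ['/']).map pvAStroke := by
    simpa using pvOuter (PySem.Chars.splitOn o.toList ['/']) (PySem.Chars.splitOn o.toList ['/']) []
  exact congrArg String.ofList (congrArg (PySem.Chars.join ['/'])
    (h.trans (List.map_congr_left (fun st _ => pvStroke_eq st))))
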